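-- pv_equiv track=rewrite | github.com/jamesben6688/coding | others/n_passwords.py | count_valid_password_substrings
-- ===== SOURCE A (Python) =====
-- def count_valid_password_substrings(s):
--     total = 0
--     n = len(s)
--
--     for length in range(6, 11):  # 长度从6到10
--         for i in range(n - length + 1):
--             substr = s[i:i+length]
--             letters = sum(c.isalpha() for c in substr)
--             digits = sum(c.isdigit() for c in substr)
--             if letters >= 2 and digits >= 2:
--                 total += 1
--
--     return total
-- ===== SOURCE B (Python) =====
-- def count_valid_password_substrings(s):
--     n = len(s)
--     # prefix counts: PL[k] = letters in s[:k], PD[k] = digits in s[:k]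
--     PL = [0]
--     PD = [0]
--     for c in s:
--         PL.append(PL[-1] + c.isalpha())
--         PD.append(PD[-1] + c.isdigit())
--     total = 0
--     for length in range(6, 11):
--         for i in range(n - length + 1):
--             if PL[i + length] - PL[i] >= 2 and PD[i + length] - PD[i] >= 2:
--                 total += 1
--     return total
-- ===== Notes on version B (the rewrite author's own statement) =====
-- stated objective: faster
-- what changed: B precomputes prefix-sum tables of letter and digit counts once, then decides each (start,length) window by two O(1) prefix differences instead of A's per-substring slice-and-scan.
import Mathlib
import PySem

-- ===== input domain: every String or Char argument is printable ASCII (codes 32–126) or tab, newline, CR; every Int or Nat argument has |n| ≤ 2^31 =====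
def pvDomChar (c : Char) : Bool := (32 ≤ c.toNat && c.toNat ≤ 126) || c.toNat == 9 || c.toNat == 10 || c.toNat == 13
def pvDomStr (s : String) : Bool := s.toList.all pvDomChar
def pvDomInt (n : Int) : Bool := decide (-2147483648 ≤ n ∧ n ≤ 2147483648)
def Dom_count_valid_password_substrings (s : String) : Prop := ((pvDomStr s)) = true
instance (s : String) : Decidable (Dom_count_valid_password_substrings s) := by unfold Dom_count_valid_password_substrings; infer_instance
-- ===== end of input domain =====

-- B replaces A's per-substring character scan by prefix-sum tables of letter/digit
-- counts, deciding each window by two O(1) prefix differences (objective: faster).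

-- ===== PORT A =====
def count_valid_password_substrings (s : String) : Int :=
  let n : Int := (s.toList.length : Int)    -- len(s)
  (PySem.List.pyRange 6 11 1).foldl (fun total length =>
    (PySem.List.pyRange 0 (n - length + 1) 1).foldl (fun total i =>
      let substr := PySem.List.slice s.toList (some i) (some (i + length))
      let letters : Int := (substr.map (fun c => if PySem.Chars.isalpha c then (1 : Int) else 0)).sum
      let digits : Int := (substr.map (fun c => if PySem.Chars.isdigit c then (1 : Int) else 0)).sum
      if letters ≥ 2 ∧ digits ≥ 2 then total + 1 else total) total) 0

-- ===== PORT B =====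
-- The append-to-PL/PD loop of Source B is exactly List.scanl; the PL[i], PL[i+length]
-- lookups are always in range, so getD is exact.
def count_valid_password_substrings_alt (s : String) : Int :=
  let l := s.toList
  let n : Int := (l.length : Int)
  let PL := l.scanl (fun a c => a + (if PySem.Chars.isalpha c then (1 : Int) else 0)) 0
  let PD := l.scanl (fun a c => a + (if PySem.Chars.isdigit c then (1 : Int) else 0)) 0
  (PySem.List.pyRange 6 11 1).foldl (fun total length =>
    (PySem.List.pyRange 0 (n - length + 1) 1).foldl (fun total i =>
      if PL.getD (i + length).toNat 0 - PL.getD i.toNat 0 ≥ 2 ∧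
         PD.getD (i + length).toNat 0 - PD.getD i.toNat 0 ≥ 2
      then total + 1 else total) total) 0

-- ===== PRECONDITION & SPEC =====
def Spec_count_valid_password_substrings (s : String) (out : Int) : Prop := out = count_valid_password_substrings_alt s
instance (s : String) (out : Int) : Decidable (Spec_count_valid_password_substrings s out) := by unfold Spec_count_valid_password_substrings; infer_instance

-- ===== CLAIM (what is proved, stated in full; the proofs are below) =====
def Claim_equal_count_valid_password_substrings : Prop := ∀ (s : String), Dom_count_valid_password_substrings s → Spec_count_valid_password_substrings s (count_valid_password_substrings s)

-- ===== LEMMAS AND PROOFS =====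

-- scanl prefix table: entry k is the accumulated sum over the first k elements
lemma scanl_getD (f : Char → Int) : ∀ (l : List Char) (a : Int) (k : Nat), k ≤ l.length →
    (l.scanl (fun a c => a + f c) a).getD k 0 = a + ((l.take k).map f).sum := by
  intro l
  induction l with
  | nil =>
      intro a k hk
      obtain rfl : k = 0 := by simpa using hk
      simp
  | cons c t ih =>
      intro a k hk
      cases k with
      | zero => simp [List.scanl_cons]
      | succ k =>
          rw [List.scanl_cons]
          simp only [List.getD, List.getElem?_cons_succ, List.take_succ_cons,
            List.map_cons, List.sum_cons]
          have := ih (a + f c) k (by simpa using hk)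
          simp only [List.getD] at this
          rw [this]; ring

-- prefix difference equals the sum over the window
lemma window_sum (f : Char → Int) (l : List Char) (i L : Int)
    (hi : 0 ≤ i) (hL : 0 ≤ L) (hn : i + L ≤ (l.length : Int)) :
    ((PySem.List.slice l (some i) (some (i + L))).map f).sum =
      (l.scanl (fun a c => a + f c) 0).getD (i + L).toNat 0 -
      (l.scanl (fun a c => a + f c) 0).getD i.toNat 0 := by
  have h1 : (i + L).toNat ≤ l.length := by omega
  have h2 : i.toNat ≤ l.length := by omega
  rw [scanl_getD f l 0 _ h1, scanl_getD f l 0 _ h2,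
      PySem.List.slice_toNat l hi (by omega)]
  have hsub : (i + L).toNat - i.toNat = L.toNat := by omega
  have hadd : (i + L).toNat = i.toNat + L.toNat := by omega
  rw [hsub, hadd, List.take_add, List.map_append, List.sum_append]
  ring

-- ===== VERDICT (by name: the statement is the Claim_ definition above) =====
theorem count_valid_password_substrings_spec : Claim_equal_count_valid_password_substrings := by
  intro s _
  unfold Spec_count_valid_password_substrings count_valid_password_substrings count_valid_password_substrings_alt
  simp only []
  apply PySem.List.foldl_congr_mem
  intro acc L hL
  apply PySem.List.foldl_congr_mem
  intro acc2 i hi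
  rw [PySem.List.mem_pyRange_one] at hL hi
  rw [window_sum (fun c => if PySem.Chars.isalpha c then (1 : Int) else 0) s.toList i L
        hi.1 (by omega) (by omega),
      window_sum (fun c => if PySem.Chars.isdigit c then (1 : Int) else 0) s.toList i L
        hi.1 (by omega) (by omega)]
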